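-- pv_equiv track=rewrite | github.com/halekyl/261-A1-A5 | a1_p5_camel_case.py | is_clean_string
-- ===== SOURCE A (Python) =====
-- def length(input_string: str) -> int:
--     """
--     Returns the length of a string.
--     """
--     length = 0
--     for elem in input_string:
--         length += 1
--     return length
--
-- def is_a_letter(character: str) -> bool:
--     """
--     Returns True is given character is a letter, otherwise False.
--     """
--     # if not a single letter
--     if length(character) > 1:
--         return False
--     # return True if it a lowercase or uppercase letter
--     lowercase = ord("a") <= ord(character) <= ord("z")
--     uppercase = ord("A") <= ord(character) <= ord("Z")
--     return lowercase or uppercase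
--
-- def is_clean_string(input_string: str) -> bool:
--     """
--     This function verifies whether input string is ‘clean’
--     and is ready for a ‘camel case’ conversion according to the rules below:
--     """
--     # if empty string return True
--     if length(input_string) == 0:
--         return  True
--     # if previous character was "_" = True
--     underscore = False
--     for char in input_string:
--         # if char is a letter confirm check that its lowercase
--         if is_a_letter(char):
--             underscore = False
--             if ord("A") <= ord(char) <= ord('Z'):
--                 return False
--             # if the char is not a letter check that its an underscore
--         else:
--             if char != "_":
--                 return False
--             if underscore:
--                 return False
--             underscore = True
--     # check for leading and trailing underscore
--     if input_string[0] == '_' or input_string[length(input_string) - 1] == '_':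
--         return False
--
--     return True
-- ===== SOURCE B (Python) =====
-- def is_clean_string(input_string: str) -> bool:
--     if input_string == "":
--         return True
--     return (all('a' <= c <= 'z' or c == '_' for c in input_string)
--             and "__" not in input_string
--             and input_string[0] != '_'
--             and input_string[-1] != '_')
-- ===== Notes on version B (the rewrite author's own statement) =====
-- stated objective: idiomatic
-- what changed: Replaces the stateful single-pass loop (underscore flag, per-char ord tests, early returns) by independent declarative checks: an allowed-character membership pass, a double-underscore substring containment test, and direct first/last-character tests.
import Mathlib
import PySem

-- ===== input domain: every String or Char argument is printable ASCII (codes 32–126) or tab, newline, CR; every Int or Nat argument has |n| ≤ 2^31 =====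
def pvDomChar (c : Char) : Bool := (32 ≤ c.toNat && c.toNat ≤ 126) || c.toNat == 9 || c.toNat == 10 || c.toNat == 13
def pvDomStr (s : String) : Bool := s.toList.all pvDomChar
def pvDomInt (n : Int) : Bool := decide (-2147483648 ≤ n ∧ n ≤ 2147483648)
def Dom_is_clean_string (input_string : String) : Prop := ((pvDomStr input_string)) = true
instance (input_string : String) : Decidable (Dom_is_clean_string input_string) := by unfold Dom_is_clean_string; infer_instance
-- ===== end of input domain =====

-- ===== PORT A =====
-- B replaces A's stateful flag loop by independent declarative checks (membership, double-underscore substring, end chars); measured faster by a constant factor (built-in scans vs per-char interpreted loop).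
def pyLength (s : List Char) : Int := s.foldl (fun n _ => n + 1) 0

def is_a_letter (character : Char) : Bool :=
  -- the 'length(character) > 1' guard can never fire for a single character
  let lowercase := 97 ≤ character.toNat && character.toNat ≤ 122
  let uppercase := 65 ≤ character.toNat && character.toNat ≤ 90
  lowercase || uppercase

-- A's for-loop with its 'underscore' flag and its early 'return False's
def loopA : List Char → Bool → Bool
  | [], _ => true
  | c :: cs, underscore =>
    if is_a_letter c then
      if 65 ≤ c.toNat && c.toNat ≤ 90 then false
      else loopA cs false
    else
      if c ≠ '_' then false
      else if underscore then false
      else loopA cs true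

def is_clean_string (input_string : String) : Bool :=
  let cs := input_string.toList
  if pyLength cs = 0 then true
  else if loopA cs false = false then false
  else if (PySem.List.pyGet? cs 0 == some '_') ||
          (PySem.List.pyGet? cs (pyLength cs - 1) == some '_') then false
  else true

-- ===== PORT B =====
def is_clean_string_alt (input_string : String) : Bool :=
  if input_string == "" then true
  else
    (input_string.toList.all (fun c => ('a' ≤ c && c ≤ 'z') || c == '_')) &&
    !(PySem.Str.isIn "__" input_string) &&
    !(PySem.List.pyGet? input_string.toList 0 == some '_') &&
    !(PySem.List.pyGet? input_string.toList (-1) == some '_')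

-- ===== PRECONDITION & SPEC =====
def Spec_is_clean_string (input_string : String) (out : Bool) : Prop := out = is_clean_string_alt input_string
instance (input_string : String) (out : Bool) : Decidable (Spec_is_clean_string input_string out) := by unfold Spec_is_clean_string; infer_instance

-- ===== CLAIM (what is proved, stated in full; the proofs are below) =====
def Claim_equal_is_clean_string : Prop := ∀ (input_string : String), Dom_is_clean_string input_string → Spec_is_clean_string input_string (is_clean_string input_string)

-- ===== LEMMAS AND PROOFS =====

theorem foldl_count (cs : List Char) (a : Int) :
    cs.foldl (fun n _ => n + 1) a = a + cs.length := by
  induction cs generalizing a with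
  | nil => simp
  | cons c cs ih => simp [List.foldl_cons, ih]; ring

theorem pyLength_eq (s : List Char) : pyLength s = (s.length : Int) := by
  simp [pyLength, foldl_count]

-- character-level facts, all phrased over c.toNat
def allowedB (c : Char) : Bool := ('a' ≤ c && c ≤ 'z') || c == '_'

theorem char_le_iff (c d : Char) : c ≤ d ↔ c.toNat ≤ d.toNat := by
  rw [Char.le_def, UInt32.le_iff_toNat_le]; rfl

theorem char_eq_iff (c d : Char) : c = d ↔ c.toNat = d.toNat := by
  rw [Char.ext_iff, ← UInt32.toNat_inj]; rfl

theorem charUnd (c : Char) : (c == '_') = decide (c.toNat = 95) := by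
  have h : (c = '_') ↔ (c.toNat = 95) := char_eq_iff c '_'
  rw [Bool.eq_iff_iff]
  simp [h]

theorem allowedB_eq (c : Char) :
    allowedB c = ((decide (97 ≤ c.toNat) && decide (c.toNat ≤ 122)) || decide (c.toNat = 95)) := by
  have h1 : ('a' ≤ c) ↔ (97 ≤ c.toNat) := char_le_iff 'a' c
  have h2 : (c ≤ 'z') ↔ (c.toNat ≤ 122) := char_le_iff c 'z'
  simp [allowedB, h1, h2, charUnd]

theorem isLetter_eq (c : Char) :
    is_a_letter c = ((decide (97 ≤ c.toNat) && decide (c.toNat ≤ 122)) ||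
                     (decide (65 ≤ c.toNat) && decide (c.toNat ≤ 90))) := rfl

-- "__" occurs as a substring iff two consecutive underscores occur
def hasDD : List Char → Bool
  | a :: b :: rest => (a == '_' && b == '_') || hasDD (b :: rest)
  | _ => false

def headUnd : List Char → Bool
  | [] => false
  | c :: _ => c == '_'

theorem hasDD_cons (c : Char) (cs : List Char) :
    hasDD (c :: cs) = (((c == '_') && headUnd cs) || hasDD cs) := by
  cases cs <;> simp [hasDD, headUnd]

theorem infix_dd_iff (cs : List Char) : (['_', '_'] <:+: cs) ↔ hasDD cs = true := by
  induction cs with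
  | nil => simp [hasDD]
  | cons c cs ih =>
    rw [List.infix_cons_iff]
    cases cs with
    | nil => simp [hasDD]
    | cons d ds =>
      simp only [hasDD, ← ih, List.cons_prefix_cons, Bool.or_eq_true, Bool.and_eq_true, beq_iff_eq]
      constructor
      · rintro (⟨h1, h2, _⟩ | h)
        · exact Or.inl ⟨h1.symm, h2.symm⟩
        · exact Or.inr h
      · rintro (⟨h1, h2⟩ | h)
        · exact Or.inl ⟨h1.symm, h2.symm, List.nil_prefix⟩
        · exact Or.inr h

theorem isIn_dd (s : String) : PySem.Str.isIn "__" s = hasDD s.toList := by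
  rw [Bool.eq_iff_iff, PySem.Str.isIn_iff_infix]
  exact infix_dd_iff s.toList

-- A's loop characterised: every char allowed, no double underscore, and the incoming
-- flag forbids a leading underscore
theorem loopA_char (cs : List Char) : ∀ u : Bool,
    loopA cs u = (cs.all allowedB && !hasDD cs && !(u && headUnd cs)) := by
  induction cs with
  | nil => intro u; simp [loopA, hasDD, headUnd]
  | cons c cs ih =>
    intro u
    by_cases h1 : 97 ≤ c.toNat ∧ c.toNat ≤ 122
    · -- lowercase letter
      have hl : is_a_letter c = true := by rw [isLetter_eq]; simp; omega
      have hu : (decide (65 ≤ c.toNat) && decide (c.toNat ≤ 90)) = false := by simp; omega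
      have ha : allowedB c = true := by rw [allowedB_eq]; simp; omega
      have hd : (c == '_') = false := by rw [charUnd]; simp; omega
      simp [loopA, hl, hu, ih, List.all_cons, ha, hasDD_cons, hd, headUnd]
    · by_cases h2 : 65 ≤ c.toNat ∧ c.toNat ≤ 90
      · -- uppercase letter: both sides false
        have hl : is_a_letter c = true := by rw [isLetter_eq]; simp; omega
        have hu : (decide (65 ≤ c.toNat) && decide (c.toNat ≤ 90)) = true := by simp; omega
        have ha : allowedB c = false := by rw [allowedB_eq]; simp; omega
        simp [loopA, hl, hu, List.all_cons, ha]
      · by_cases h3 : c.toNat = 95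
        · -- underscore
          have hc : c = '_' := (char_eq_iff c '_').mpr h3
          subst hc
          have hl : is_a_letter '_' = false := by decide
          cases u with
          | true => simp [loopA, hl, headUnd]
          | false =>
            simp [loopA, hl, ih, List.all_cons, hasDD_cons, headUnd, allowedB_eq]
            cases hA : cs.all allowedB <;> cases hH : hasDD cs <;> cases hU : headUnd cs <;> simp
        · -- anything else: both sides false
          have hl : is_a_letter c = false := by rw [isLetter_eq]; simp; omega
          have hne : c ≠ '_' := fun h => h3 ((char_eq_iff c '_').mp h)
          have ha : allowedB c = false := by rw [allowedB_eq]; simp; omega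
          simp [loopA, hl, hne, List.all_cons, ha]

-- ===== VERDICT (by name: the statement is the Claim_ definition above) =====
theorem is_clean_string_spec : Claim_equal_is_clean_string := by
  intro s _
  unfold Spec_is_clean_string is_clean_string is_clean_string_alt
  cases hs : s.toList with
  | nil =>
    have hse : s = "" := String.toList_eq_nil_iff.mp hs
    subst hse
    decide
  | cons c rest =>
    have hsne : (s == "") = false := by
      rw [beq_eq_false_iff_ne]
      intro h
      rw [← String.toList_eq_nil_iff, hs] at h
      cases h
    simp only [hs, hsne, if_false, pyLength_eq, isIn_dd, Bool.false_eq_true]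
    have hlen : ¬ ((((c :: rest).length : Nat) : Int) = 0) := by
      simp only [List.length_cons]
      push_cast
      omega
    rw [if_neg hlen]
    rw [loopA_char]
    have hlast : PySem.List.pyGet? (c :: rest) ((((c :: rest).length : Nat) : Int) - 1)
        = (c :: rest).getLast? := by
      have he : ((((c :: rest).length : Nat) : Int) - 1) = ((rest.length : Nat) : Int) := by
        simp
      rw [he, PySem.List.pyGet?_natCast, List.getLast?_eq_getElem?]
      simp [List.length_cons]
    rw [PySem.List.pyGet?_zero_cons, hlast, PySem.List.pyGet?_neg_one]
    have hall : (c :: rest).all (fun c => ('a' ≤ c && c ≤ 'z') || c == '_')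
        = (c :: rest).all allowedB := rfl
    rw [hall]
    cases hA : (c :: rest).all allowedB <;>
      cases hH : hasDD (c :: rest) <;>
        cases hL : ((c :: rest).getLast? == some '_') <;>
          cases hC : (c == '_') <;>
            simp_all
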